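-- pv_equiv track=rewrite | github.com/iam-rajesh-patnala/Programming-Foundations | IDP Prep Series Level - 1/IDP_Set_2/Area of a Rectangle.py | get_max_sub_matrix_area
-- ===== SOURCE A (Python) =====
-- def check_if_sub_matrix_contains_zero(matrix, i, j, k, l):
--     for m in range(k + 1):
--         for n in range(l + 1):
--             if matrix[i + m][j + n] == "O":
--                 return True
--     return False
--
-- def get_max_sub_matrix_area(matrix, rows, columns, i, j):
--     max_sub_matrix_area = 0
--     for k in range(rows - i):
--         for l in range(columns - j):
--             is_sub_matrix_contains_zero = check_if_sub_matrix_contains_zero(matrix, i, j, k, l)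
--
--             if not is_sub_matrix_contains_zero:
--                 max_sub_matrix_area = max(max_sub_matrix_area, (k + 1) * (l + 1))
--     return max_sub_matrix_area
-- ===== SOURCE B (Python) =====
-- def get_max_sub_matrix_area(matrix, rows, columns, i, j):
--     best = 0
--     width = columns - j
--     for k in range(rows - i):
--         row = matrix[i + k]
--         r = 0
--         while r < columns - j and row[j + r] != "O":
--             r += 1
--         if r < width:
--             width = r
--         best = max(best, (k + 1) * width)
--     return best
-- ===== Notes on version B (the rewrite author's own statement) =====
-- stated objective: faster
-- what changed: Instead of re-scanning every candidate sub-matrix for an 'O' (A's nested check over all (k,l)), B computes per row the run length of non-'O' cells starting at column j and keeps a running minimum width, so the best area ending at each row is obtained in one pass over the grid.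
-- outside the precondition, e.g. on get_max_sub_matrix_area([['O'], []], 2, 1, 0, 0): A returns 0, B raises IndexError; on get_max_sub_matrix_area([['X']], 1, 1, -1, 0): A returns 2, B returns 2
import Mathlib
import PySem

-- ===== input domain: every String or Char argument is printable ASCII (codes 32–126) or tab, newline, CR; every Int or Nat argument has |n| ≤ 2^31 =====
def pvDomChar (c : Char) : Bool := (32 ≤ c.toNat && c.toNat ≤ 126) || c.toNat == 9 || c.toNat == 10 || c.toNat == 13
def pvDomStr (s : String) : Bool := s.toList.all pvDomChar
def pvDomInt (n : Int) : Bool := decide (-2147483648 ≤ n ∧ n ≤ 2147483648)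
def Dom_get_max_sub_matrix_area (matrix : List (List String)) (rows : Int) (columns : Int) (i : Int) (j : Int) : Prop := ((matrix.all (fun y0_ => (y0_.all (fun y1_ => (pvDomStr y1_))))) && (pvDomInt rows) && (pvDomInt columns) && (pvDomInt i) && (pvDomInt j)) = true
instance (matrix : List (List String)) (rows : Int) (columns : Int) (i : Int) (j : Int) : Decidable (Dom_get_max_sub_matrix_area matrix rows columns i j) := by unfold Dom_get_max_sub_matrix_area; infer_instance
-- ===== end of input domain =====

-- B replaces A's per-rectangle full rescan for "O" by per-row run lengths with a running
-- minimum width (one pass over the grid); proved to return the same value whenever the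
-- scanned region lies inside the matrix (Pre_), where both Pythons return normally.


-- ===== PORT A =====
def pvCheck (matrix : List (List String)) (i j k l : Int) : Bool :=
  (PySem.List.pyRange 0 (k + 1) 1).any (fun m =>
    (PySem.List.pyRange 0 (l + 1) 1).any (fun n =>
      PySem.List.pyGetD (PySem.List.pyGetD matrix (i + m) []) (j + n) "" == "O"))

def get_max_sub_matrix_area (matrix : List (List String)) (rows : Int) (columns : Int) (i : Int) (j : Int) : Int :=
  (PySem.List.pyRange 0 (rows - i) 1).foldl (fun acc k =>
    (PySem.List.pyRange 0 (columns - j) 1).foldl (fun acc2 l =>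
      if pvCheck matrix i j k l then acc2 else max acc2 ((k + 1) * (l + 1))) acc) 0

-- ===== PORT B =====
-- the while loop 'while r < columns - j and row[j + r] != "O": r += 1' as fuel recursion
def pvRun (row : List String) (j : Int) : Nat → Int
  | 0 => 0
  | t + 1 => if PySem.List.pyGetD row j "" ≠ "O" then 1 + pvRun row (j + 1) t else 0

def get_max_sub_matrix_area_alt (matrix : List (List String)) (rows : Int) (columns : Int) (i : Int) (j : Int) : Int :=
  ((PySem.List.pyRange 0 (rows - i) 1).foldl (fun (st : Int × Int) k =>
      let r := pvRun (PySem.List.pyGetD matrix (i + k) []) j (columns - j).toNat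
      let w := min st.2 r
      (max st.1 ((k + 1) * w), w)) ((0 : Int), columns - j)).1

-- ===== PRECONDITION & SPEC =====
-- Pre_ admits every input whose scanned region lies inside the matrix (including the
-- empty regions rows ≤ i or columns ≤ j, where both return 0): outside it the Python A
-- may raise IndexError, wrap negative indices, or return via an early exit on a ragged
-- row that B's row scan would index out of range.
def Pre_get_max_sub_matrix_area (matrix : List (List String)) (rows : Int) (columns : Int) (i : Int) (j : Int) : Prop :=
  rows - i ≤ 0 ∨
    (0 ≤ i ∧ rows ≤ (matrix.length : Int) ∧
      (columns - j ≤ 0 ∨ (0 ≤ j ∧ ∀ row ∈ matrix, columns ≤ (row.length : Int))))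
instance (matrix : List (List String)) (rows : Int) (columns : Int) (i : Int) (j : Int) : Decidable (Pre_get_max_sub_matrix_area matrix rows columns i j) := by unfold Pre_get_max_sub_matrix_area; infer_instance

def pvWitness_get_max_sub_matrix_area : List (List String) × Int × Int × Int × Int :=
  ([["X", "O"], ["X", "X"]], 2, 2, 0, 0)

def Spec_get_max_sub_matrix_area (matrix : List (List String)) (rows : Int) (columns : Int) (i : Int) (j : Int) (out : Int) : Prop := out = get_max_sub_matrix_area_alt matrix rows columns i j
instance (matrix : List (List String)) (rows : Int) (columns : Int) (i : Int) (j : Int) (out : Int) : Decidable (Spec_get_max_sub_matrix_area matrix rows columns i j out) := by unfold Spec_get_max_sub_matrix_area; infer_instance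

-- ===== CLAIM (what is proved, stated in full; the proofs are below) =====
def Claim_equal_get_max_sub_matrix_area : Prop := ∀ (matrix : List (List String)) (rows : Int) (columns : Int) (i : Int) (j : Int), Dom_get_max_sub_matrix_area matrix rows columns i j → Pre_get_max_sub_matrix_area matrix rows columns i j → Spec_get_max_sub_matrix_area matrix rows columns i j (get_max_sub_matrix_area matrix rows columns i j)

-- ===== LEMMAS AND PROOFS =====

-- the cell both programs read at offset (m, n) from the corner
def pvCell (matrix : List (List String)) (i j m n : Int) : String :=
  PySem.List.pyGetD (PySem.List.pyGetD matrix (i + m) []) (j + n) ""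

-- run length of row i+k, as B computes it
def pvRI (matrix : List (List String)) (columns i j k : Int) : Int :=
  pvRun (PySem.List.pyGetD matrix (i + k) []) j (columns - j).toNat

-- running minimum width after t rows
def pvWd (matrix : List (List String)) (columns i j : Int) : Nat → Int
  | 0 => columns - j
  | t + 1 => min (pvWd matrix columns i j t) (pvRI matrix columns i j t)

theorem pvRun_bounds (row : List String) (j : Int) (F : Nat) :
    0 ≤ pvRun row j F ∧ pvRun row j F ≤ (F : Int) := by
  induction F generalizing j with
  | zero => simp [pvRun]
  | succ t ih =>
    simp only [pvRun]
    split
    · have := ih (j + 1); push_cast; omega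
    · exact ⟨le_rfl, by positivity⟩

theorem pvRun_iff (row : List String) (j : Int) (F : Nat) (n : Int) (hn : 0 ≤ n) :
    n < pvRun row j F ↔ (n < (F : Int) ∧ ∀ t : Int, 0 ≤ t → t ≤ n → PySem.List.pyGetD row (j + t) "" ≠ "O") := by
  induction F generalizing j n with
  | zero =>
    simp only [pvRun, Nat.cast_zero]
    exact ⟨fun h => absurd h (by omega), fun h => h.1⟩
  | succ t ih =>
    simp only [pvRun]
    by_cases c : PySem.List.pyGetD row j "" ≠ "O"
    · rw [if_pos c]
      by_cases h0 : n = 0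
      · subst h0
        have hb := pvRun_bounds row (j + 1) t
        constructor
        · intro _
          refine ⟨by push_cast; omega, ?_⟩
          intro t' ht0 ht1
          have ht : t' = 0 := by omega
          subst ht
          simpa using c
        · intro _
          omega
      · have hih := ih (j + 1) (n - 1) (by omega)
        constructor
        · intro h
          have hlt : n - 1 < pvRun row (j + 1) t := by omega
          obtain ⟨ha, hb⟩ := hih.mp hlt
          refine ⟨by push_cast at ha ⊢; omega, ?_⟩
          intro t' ht0 ht1
          by_cases ht'0 : t' = 0
          · subst ht'0
            simpa using c
          · have h2 := hb (t' - 1) (by omega) (by omega)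
            have e : j + 1 + (t' - 1) = j + t' := by ring
            rwa [e] at h2
        · rintro ⟨ha, hb⟩
          have : n - 1 < pvRun row (j + 1) t := by
            refine hih.mpr ⟨by push_cast at ha ⊢; omega, ?_⟩
            intro t' ht0 ht1
            have h2 := hb (t' + 1) (by omega) (by omega)
            have e : j + (t' + 1) = j + 1 + t' := by ring
            rwa [e] at h2
          omega
    · rw [if_neg c]
      push Not at c
      constructor
      · intro h
        omega
      · rintro ⟨_, hb⟩
        exact absurd c (by simpa using hb 0 le_rfl hn)

theorem pvCheck_false_iff (matrix : List (List String)) (i j k l : Int) :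
    pvCheck matrix i j k l = false ↔
      ∀ m : Int, 0 ≤ m → m ≤ k → ∀ n : Int, 0 ≤ n → n ≤ l → pvCell matrix i j m n ≠ "O" := by
  simp only [pvCheck, pvCell, Bool.eq_false_iff, ne_eq, List.any_eq_true,
    PySem.List.mem_pyRange_one, beq_iff_eq]
  push Not
  constructor
  · intro h m hm0 hmk n hn0 hnl
    exact h m ⟨hm0, by omega⟩ n ⟨hn0, by omega⟩
  · intro h m hm n hn
    exact h m hm.1 (by omega) n hn.1 (by omega)

theorem pvRI_nonneg (matrix : List (List String)) (columns i j k : Int) :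
    0 ≤ pvRI matrix columns i j k :=
  (pvRun_bounds _ _ _).1

theorem pvWd_le (matrix : List (List String)) (columns i j : Int) (t : Nat) :
    pvWd matrix columns i j t ≤ columns - j := by
  induction t with
  | zero => exact le_rfl
  | succ t ih => exact le_trans (min_le_left _ _) ih

theorem pvWd_nonneg (matrix : List (List String)) (columns i j : Int) (hC : 0 ≤ columns - j)
    (t : Nat) : 0 ≤ pvWd matrix columns i j t := by
  induction t with
  | zero => exact hC
  | succ t ih => exact le_min ih (pvRI_nonneg _ _ _ _ _)

theorem pvWd_lt_iff (matrix : List (List String)) (columns i j : Int) (t : Nat) (l : Int) :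
    l < pvWd matrix columns i j (t + 1) ↔
      (l < columns - j ∧ ∀ m : Nat, m ≤ t → l < pvRI matrix columns i j (m : Int)) := by
  induction t with
  | zero =>
    simp only [pvWd, lt_min_iff]
    constructor
    · rintro ⟨h1, h2⟩
      refine ⟨h1, ?_⟩
      intro m hm
      have : m = 0 := by omega
      subst this
      exact_mod_cast h2
    · rintro ⟨h1, h2⟩
      exact ⟨h1, by exact_mod_cast h2 0 le_rfl⟩
  | succ t ih =>
    show l < min (pvWd matrix columns i j (t + 1)) (pvRI matrix columns i j ((t : Int) + 1)) ↔ _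
    rw [lt_min_iff, ih]
    constructor
    · rintro ⟨⟨h1, h2⟩, h3⟩
      refine ⟨h1, ?_⟩
      intro m hm
      by_cases hmt : m ≤ t
      · exact h2 m hmt
      · have : m = t + 1 := by omega
        subst this
        exact_mod_cast h3
    · rintro ⟨h1, h2⟩
      exact ⟨⟨h1, fun m hm => h2 m (by omega)⟩, by exact_mod_cast h2 (t + 1) le_rfl⟩

theorem pvInner (matrix : List (List String)) (i j k C0 W : Int) (hk : 0 ≤ k) (hW : W ≤ C0)
    (hiff : ∀ l : Int, 0 ≤ l → l < C0 → (pvCheck matrix i j k l = false ↔ l < W)) :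
    ∀ a acc : Int, 0 ≤ a →
      (PySem.List.pyRange a C0 1).foldl (fun acc2 l =>
        if pvCheck matrix i j k l then acc2 else max acc2 ((k + 1) * (l + 1))) acc
      = if a < W then max acc ((k + 1) * W) else acc := by
  intro a acc ha
  generalize hd : (C0 - a).toNat = d
  induction d generalizing a acc with
  | zero =>
    have hle : C0 ≤ a := by omega
    rw [PySem.List.pyRange_one_eq_nil hle, List.foldl_nil, if_neg (by omega)]
  | succ d ih =>
    have hlt : a < C0 := by omega
    rw [PySem.List.pyRange_one_cons hlt]
    cases hc : pvCheck matrix i j k a with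
    | true =>
      simp only [List.foldl_cons, hc, if_true]
      have haW : ¬ a < W := by
        intro h
        have := (hiff a ha hlt).mpr h
        simp [hc] at this
      rw [ih (a + 1) acc (by omega) (by omega), if_neg (by omega), if_neg haW]
    | false =>
      simp only [List.foldl_cons, hc, Bool.false_eq_true, if_false]
      have haW : a < W := (hiff a ha hlt).mp hc
      rw [ih (a + 1) (max acc ((k + 1) * (a + 1))) (by omega) (by omega)]
      by_cases h2 : a + 1 < W
      · rw [if_pos h2, if_pos haW]
        have hle : (k + 1) * (a + 1) ≤ (k + 1) * W :=
          mul_le_mul_of_nonneg_left (by omega) (by omega)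
        omega
      · have heq : a + 1 = W := by omega
        rw [if_neg h2, if_pos haW, heq]

theorem pvOuter (matrix : List (List String)) (columns i j T : Int)
    (hC : 0 < columns - j) :
    ∀ a acc : Int, 0 ≤ a → 0 ≤ acc →
      (PySem.List.pyRange a T 1).foldl (fun acc k =>
        (PySem.List.pyRange 0 (columns - j) 1).foldl (fun acc2 l =>
          if pvCheck matrix i j k l then acc2 else max acc2 ((k + 1) * (l + 1))) acc) acc
      = ((PySem.List.pyRange a T 1).foldl (fun (st : Int × Int) k =>
          let r := pvRun (PySem.List.pyGetD matrix (i + k) []) j (columns - j).toNat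
          let w := min st.2 r
          (max st.1 ((k + 1) * w), w)) (acc, pvWd matrix columns i j a.toNat)).1 := by
  intro a acc ha hacc
  generalize hd : (T - a).toNat = d
  induction d generalizing a acc with
  | zero =>
    have hle : T ≤ a := by omega
    rw [PySem.List.pyRange_one_eq_nil hle, List.foldl_nil, List.foldl_nil]
  | succ d ih =>
    have hlt : a < T := by omega
    rw [PySem.List.pyRange_one_cons hlt, List.foldl_cons, List.foldl_cons]
    have hcast : ((a.toNat : Int)) = a := Int.toNat_of_nonneg ha
    have hri : pvRI matrix columns i j a = pvRun (PySem.List.pyGetD matrix (i + a) []) j (columns - j).toNat := rfl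
    have hwd : pvWd matrix columns i j (a.toNat + 1)
        = min (pvWd matrix columns i j a.toNat) (pvRun (PySem.List.pyGetD matrix (i + a) []) j (columns - j).toNat) := by
      show min (pvWd matrix columns i j a.toNat) (pvRI matrix columns i j (a.toNat : Int)) = _
      rw [hcast, hri]
    set W := pvWd matrix columns i j (a.toNat + 1) with hWdef
    have hW0 : 0 ≤ W := pvWd_nonneg matrix columns i j (by omega) _
    have hWle : W ≤ columns - j := pvWd_le matrix columns i j _
    have hiff : ∀ l : Int, 0 ≤ l → l < columns - j → (pvCheck matrix i j a l = false ↔ l < W) := by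
      intro l hl0 hlC
      rw [pvCheck_false_iff, hWdef, pvWd_lt_iff]
      constructor
      · intro h
        refine ⟨hlC, ?_⟩
        intro m hm
        rw [pvRI, pvRun_iff _ _ _ l hl0]
        refine ⟨by omega, ?_⟩
        intro t' ht0 ht1
        have := h (m : Int) (by positivity) (by omega) t' ht0 ht1
        simpa [pvCell] using this
      · rintro ⟨_, hr⟩ m hm0 hma n hn0 hnl
        have h1 := hr m.toNat (by omega)
        rw [pvRI, pvRun_iff _ _ _ l hl0] at h1
        have h2 := h1.2 n hn0 hnl
        rw [Int.toNat_of_nonneg hm0] at h2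
        simpa [pvCell] using h2
    -- A's inner loop for row a
    rw [pvInner matrix i j a (columns - j) W ha hWle hiff 0 acc (le_refl 0)]
    -- B's step for row a
    show _ = ((PySem.List.pyRange (a + 1) T 1).foldl _
        (max acc ((a + 1) * min (pvWd matrix columns i j a.toNat)
          (pvRun (PySem.List.pyGetD matrix (i + a) []) j (columns - j).toNat)),
         min (pvWd matrix columns i j a.toNat)
          (pvRun (PySem.List.pyGetD matrix (i + a) []) j (columns - j).toNat))).1
    have hstep : (if 0 < W then max acc ((a + 1) * W) else acc) = max acc ((a + 1) * W) := by
      by_cases h0 : 0 < W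
      · rw [if_pos h0]
      · have : W = 0 := by omega
        rw [if_neg h0, this, mul_zero]
        omega
    rw [hstep]
    have hrec := ih (a + 1) (max acc ((a + 1) * W)) (by omega) (by omega) (by omega)
    have hwd1 : (a + 1).toNat = a.toNat + 1 := by omega
    rw [hwd1] at hrec
    rw [← hwd]
    exact hrec

theorem pvB_nonpos (matrix : List (List String)) (columns i j T : Int)
    (hC : columns - j ≤ 0) :
    ∀ a acc w : Int, 0 ≤ a → 0 ≤ acc → w ≤ 0 →
      ((PySem.List.pyRange a T 1).foldl (fun (st : Int × Int) k =>
          let r := pvRun (PySem.List.pyGetD matrix (i + k) []) j (columns - j).toNat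
          let w := min st.2 r
          (max st.1 ((k + 1) * w), w)) (acc, w)).1 = acc := by
  intro a acc w ha hacc hw
  generalize hd : (T - a).toNat = d
  induction d generalizing a acc w with
  | zero =>
    have hle : T ≤ a := by omega
    rw [PySem.List.pyRange_one_eq_nil hle, List.foldl_nil]
  | succ d ih =>
    have hlt : a < T := by omega
    rw [PySem.List.pyRange_one_cons hlt, List.foldl_cons]
    have hfuel : (columns - j).toNat = 0 := by omega
    rw [hfuel]
    show ((PySem.List.pyRange (a + 1) T 1).foldl _
        (max acc ((a + 1) * min w (pvRun (PySem.List.pyGetD matrix (i + a) []) j 0)),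
         min w (pvRun (PySem.List.pyGetD matrix (i + a) []) j 0))).1 = acc
    have hr : pvRun (PySem.List.pyGetD matrix (i + a) []) j 0 = 0 := rfl
    rw [hr]
    have hmin : min w (0 : Int) = w := by omega
    rw [hmin]
    have hmax : max acc ((a + 1) * w) = acc := by
      have : (a + 1) * w ≤ 0 := mul_nonpos_of_nonneg_of_nonpos (by omega) hw
      omega
    rw [hmax]
    have := ih (a + 1) acc w (by omega) hacc hw (by omega)
    rw [hfuel] at this
    exact this

theorem pvA_nonpos (matrix : List (List String)) (columns i j T : Int)
    (hC : columns - j ≤ 0) (acc : Int) :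
    (PySem.List.pyRange 0 T 1).foldl (fun acc k =>
        (PySem.List.pyRange 0 (columns - j) 1).foldl (fun acc2 l =>
          if pvCheck matrix i j k l then acc2 else max acc2 ((k + 1) * (l + 1))) acc) acc
      = acc := by
  rw [PySem.List.pyRange_one_eq_nil (by omega : columns - j ≤ 0)]
  simp

-- ===== VERDICT (by name: the statement is the Claim_ definition above) =====
theorem get_max_sub_matrix_area_spec : Claim_equal_get_max_sub_matrix_area := by
  intro matrix rows columns i j _ _
  show get_max_sub_matrix_area matrix rows columns i j = get_max_sub_matrix_area_alt matrix rows columns i j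
  unfold get_max_sub_matrix_area get_max_sub_matrix_area_alt
  by_cases hC : 0 < columns - j
  · have := pvOuter matrix columns i j (rows - i) hC 0 0 le_rfl le_rfl
    simpa using this
  · rw [pvA_nonpos matrix columns i j (rows - i) (by omega) 0,
      pvB_nonpos matrix columns i j (rows - i) (by omega) 0 0 (columns - j) le_rfl le_rfl (by omega)]
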